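-- pv_equiv track=rewrite | github.com/bodhix-ai/cora-dev-toolkit | validation/shared/output_format.py | categorize_by_severity
-- ===== SOURCE A (Python) =====
-- SEVERITY_CRITICAL = "critical"
--
-- SEVERITY_HIGH = "high"
--
-- SEVERITY_MEDIUM = "medium"
--
-- SEVERITY_LOW = "low"
--
-- def categorize_by_severity(errors: list[dict]) -> dict[str, list[dict]]:
--     """
--     Group errors by severity level.
--
--     Args:
--         errors: List of error dictionaries
--
--     Returns:
--         Dictionary mapping severity levels to lists of errors
--
--     Example:
--         >>> errors = [
--         ...     create_error(file="a.tsx", message="Error 1", category="Test", severity="critical"),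
--         ...     create_error(file="b.tsx", message="Error 2", category="Test", severity="high"),
--         ...     create_error(file="c.tsx", message="Error 3", category="Test", severity="high"),
--         ... ]
--         >>> by_severity = categorize_by_severity(errors)
--         >>> len(by_severity["critical"])
--         1
--         >>> len(by_severity["high"])
--         2
--     """
--     by_severity = {
--         SEVERITY_CRITICAL: [],
--         SEVERITY_HIGH: [],
--         SEVERITY_MEDIUM: [],
--         SEVERITY_LOW: []
--     }
--
--     for error in errors:
--         severity = error.get("severity", SEVERITY_MEDIUM)
--         if severity in by_severity:
--             by_severity[severity].append(error)
--
--     return by_severity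
-- ===== SOURCE B (Python) =====
-- SEVERITY_CRITICAL = "critical"
--
-- SEVERITY_HIGH = "high"
--
-- SEVERITY_MEDIUM = "medium"
--
-- SEVERITY_LOW = "low"
--
--
-- def categorize_by_severity(errors: list[dict]) -> dict[str, list[dict]]:
--     """Group errors by severity: one filtering pass per fixed severity level."""
--     return {
--         level: [e for e in errors if e.get("severity", SEVERITY_MEDIUM) == level]
--         for level in (SEVERITY_CRITICAL, SEVERITY_HIGH, SEVERITY_MEDIUM, SEVERITY_LOW)
--     }
-- ===== Notes on version B (the rewrite author's own statement) =====
-- stated objective: simpler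
-- what changed: Replaces the mutable four-bucket dict and single dispatch loop by a dict comprehension over the four fixed severity constants, each value a filtering comprehension over the full error list (four scans instead of one dispatch pass).
import Mathlib
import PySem

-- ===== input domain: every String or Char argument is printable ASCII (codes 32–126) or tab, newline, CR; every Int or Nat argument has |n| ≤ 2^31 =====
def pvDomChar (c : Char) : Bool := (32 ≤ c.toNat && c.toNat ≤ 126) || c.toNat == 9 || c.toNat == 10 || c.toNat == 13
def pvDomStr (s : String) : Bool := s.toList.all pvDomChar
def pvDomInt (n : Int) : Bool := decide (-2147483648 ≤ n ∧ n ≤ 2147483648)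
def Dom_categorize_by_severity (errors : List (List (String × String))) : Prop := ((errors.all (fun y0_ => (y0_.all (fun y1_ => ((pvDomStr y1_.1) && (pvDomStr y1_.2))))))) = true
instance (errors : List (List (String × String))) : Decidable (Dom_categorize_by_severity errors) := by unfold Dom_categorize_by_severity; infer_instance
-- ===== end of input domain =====

-- B replaces A's single dispatch loop into four mutable buckets by one filtering pass
-- per fixed severity level (simpler; same behaviour, no speed claim).

-- ===== PORT A =====
-- error.get("severity", SEVERITY_MEDIUM) on the error dict (association list)
def pvSeverityOf (e : List (String × String)) : String :=
  (PySem.Dict.mk e).getD "severity" "medium"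

-- the body of A's for-loop: dispatch one error into its bucket (if the key exists)
def pvStep (d : PySem.Dict String (List (List (String × String)))) (e : List (String × String)) :
    PySem.Dict String (List (List (String × String))) :=
  let s := pvSeverityOf e
  if d.contains s then d.modify s [] (fun xs => xs ++ [e]) else d

def categorize_by_severity (errors : List (List (String × String))) : List (String × List (List (String × String))) :=
  let init : PySem.Dict String (List (List (String × String))) :=
    PySem.Dict.mk [("critical", []), ("high", []), ("medium", []), ("low", [])]
  (errors.foldl pvStep init).items

-- ===== PORT B =====
def categorize_by_severity_alt (errors : List (List (String × String))) : List (String × List (List (String × String))) :=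
  ["critical", "high", "medium", "low"].map
    (fun level => (level, errors.filter (fun e => pvSeverityOf e == level)))

-- ===== PRECONDITION & SPEC =====
def Spec_categorize_by_severity (errors : List (List (String × String))) (out : List (String × List (List (String × String)))) : Prop := out = categorize_by_severity_alt errors
instance (errors : List (List (String × String))) (out : List (String × List (List (String × String)))) : Decidable (Spec_categorize_by_severity errors out) := by unfold Spec_categorize_by_severity; infer_instance

-- ===== CLAIM (what is proved, stated in full; the proofs are below) =====
def Claim_equal_categorize_by_severity : Prop := ∀ (errors : List (List (String × String))), Dom_categorize_by_severity errors → Spec_categorize_by_severity errors (categorize_by_severity errors)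

-- ===== LEMMAS AND PROOFS =====

-- One step of A's loop on the four-bucket dict: the matching bucket (if any) gains e.
theorem pv_step_eval (e : List (String × String))
    (a b c d : List (List (String × String))) :
    pvStep (PySem.Dict.mk [("critical", a), ("high", b), ("medium", c), ("low", d)]) e
    = PySem.Dict.mk
        [("critical", if pvSeverityOf e = "critical" then a ++ [e] else a),
         ("high",     if pvSeverityOf e = "high" then b ++ [e] else b),
         ("medium",   if pvSeverityOf e = "medium" then c ++ [e] else c),
         ("low",      if pvSeverityOf e = "low" then d ++ [e] else d)] := by
  by_cases h1 : pvSeverityOf e = "critical"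
  · simp [pvStep, PySem.Dict.contains, PySem.Dict.modify, PySem.Dict.insert,
      PySem.Dict.getD, PySem.Dict.get?, h1]
  by_cases h2 : pvSeverityOf e = "high"
  · simp [pvStep, PySem.Dict.contains, PySem.Dict.modify, PySem.Dict.insert,
      PySem.Dict.getD, PySem.Dict.get?, h2]
  by_cases h3 : pvSeverityOf e = "medium"
  · simp [pvStep, PySem.Dict.contains, PySem.Dict.modify, PySem.Dict.insert,
      PySem.Dict.getD, PySem.Dict.get?, h3]
  by_cases h4 : pvSeverityOf e = "low"
  · simp [pvStep, PySem.Dict.contains, PySem.Dict.modify, PySem.Dict.insert,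
      PySem.Dict.getD, PySem.Dict.get?, h4]
  · simp [pvStep, PySem.Dict.contains, h1, h2, h3, h4,
      Ne.symm h1, Ne.symm h2, Ne.symm h3, Ne.symm h4]

-- Loop invariant: A's dispatch loop appends, to each bucket, exactly the errors
-- whose severity equals that bucket's key.
theorem pv_loop (l : List (List (String × String)))
    (a b c d : List (List (String × String))) :
    l.foldl pvStep
      (PySem.Dict.mk [("critical", a), ("high", b), ("medium", c), ("low", d)])
    = PySem.Dict.mk
        [("critical", a ++ l.filter (fun e => pvSeverityOf e == "critical")),
         ("high",     b ++ l.filter (fun e => pvSeverityOf e == "high")),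
         ("medium",   c ++ l.filter (fun e => pvSeverityOf e == "medium")),
         ("low",      d ++ l.filter (fun e => pvSeverityOf e == "low"))] := by
  induction l generalizing a b c d with
  | nil => simp
  | cons e t ih =>
    rw [List.foldl_cons, pv_step_eval, ih]
    simp only [List.filter_cons]
    by_cases h1 : pvSeverityOf e = "critical" <;>
      by_cases h2 : pvSeverityOf e = "high" <;>
        by_cases h3 : pvSeverityOf e = "medium" <;>
          by_cases h4 : pvSeverityOf e = "low" <;>
            simp [h1, h2, h3, h4]

-- ===== VERDICT (by name: the statement is the Claim_ definition above) =====
theorem categorize_by_severity_spec : Claim_equal_categorize_by_severity := by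
  intro errors _
  show categorize_by_severity errors = categorize_by_severity_alt errors
  simp only [categorize_by_severity, categorize_by_severity_alt]
  rw [pv_loop]
  simp
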